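-- pv_equiv track=rewrite | github.com/IsaPeter/buffero | buffero.py | generate_pattern
-- ===== SOURCE A (Python) =====
-- def generate_pattern(plength):
--     """
--     This function will generate unique cyclic string for EIP identification.
--     The result is the same of msf-pattern_create. The result works with msf-pattern_offset.
--     """
--
--     pattern = ""        # The result pattern string
--     i = 0               # counter for numbers
--     j = 0               # counter for lower alphabet
--     k = 0               # counter for Uppel Letters
--     while len(pattern)<plength:
--         pattern += _get_next_pattern_string(i,j,k)  # Generate the next pattern element
--         i += 1
--         if i == 10:
--             i = 0
--             j += 1
--             if j == 26:
--                 j= 0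
--                 k+=1
--     if len(pattern)>plength:
--         pattern = pattern[:plength] # Split the pattern to the correct size
--         return pattern          # return pattern
--     elif len(pattern)==plength:
--         return pattern
--
-- def _get_next_pattern_string(i,j,k):
--     alphabet = ['a','b','c','d','e','f','g','h','i','j','k','l','m','n','o','p','q','r','s','t','u','v','w','x','y','z'] # alphabet
--     return alphabet[k].upper()+alphabet[j]+str(i)   # generate pattern element from the given parameters, and return it.
-- ===== SOURCE B (Python) =====
-- def generate_pattern(plength):
--     """
--     Generate the msf-style cyclic pattern of the given length by direct
--     indexing: element n is alphabet[n//260].upper() + alphabet[n//10 % 26] + str(n % 10).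
--     """
--     alphabet = "abcdefghijklmnopqrstuvwxyz"
--     parts = [alphabet[n // 260].upper() + alphabet[n // 10 % 26] + str(n % 10)
--              for n in range((plength + 2) // 3)]
--     return "".join(parts)[:plength]
-- ===== Notes on version B (the rewrite author's own statement) =====
-- stated objective: simpler
-- what changed: Replaced the three cascading carry counters and string accumulation in a while loop by a single comprehension over an element index n, computing each element directly as alphabet[n//260].upper()+alphabet[n//10%26]+str(n%10) and slicing the join to length.
import Mathlib
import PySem

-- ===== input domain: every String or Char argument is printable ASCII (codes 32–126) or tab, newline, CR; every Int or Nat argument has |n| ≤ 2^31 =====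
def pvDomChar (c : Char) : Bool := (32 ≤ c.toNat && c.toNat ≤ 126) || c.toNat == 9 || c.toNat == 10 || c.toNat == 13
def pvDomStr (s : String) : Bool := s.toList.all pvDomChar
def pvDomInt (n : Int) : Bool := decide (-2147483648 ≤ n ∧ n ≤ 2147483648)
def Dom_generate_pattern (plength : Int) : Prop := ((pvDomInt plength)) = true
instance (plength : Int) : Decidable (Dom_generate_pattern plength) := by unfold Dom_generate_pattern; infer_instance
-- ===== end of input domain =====

-- B replaces A's three cascading carry counters and while-loop string accumulation by one
-- comprehension over an element index n (simpler decomposition; same return values).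

-- ===== PORT A =====
def pvAlphabet : List Char :=
  ['a','b','c','d','e','f','g','h','i','j','k','l','m','n','o','p','q','r','s','t','u','v','w','x','y','z']

-- _get_next_pattern_string(i, j, k): alphabet[k].upper() + alphabet[j] + str(i)
-- (alphabet[k]/alphabet[j] raise IndexError for k,j ≥ 26: those inputs are outside Pre_, the
-- match's [] arm is never reached there by A's callers inside Pre_)
def pvNextPat (i j k : Nat) : List Char :=
  match pvAlphabet[k]?, pvAlphabet[j]? with
  | some ck, some cj => ck.toUpper :: cj :: PySem.Int.toChars (i : Int)
  | _, _ => []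

-- the while loop, fuel-bounded for totality (6761 steps suffice for every plength ≤ 20280)
def pvLoopA (fuel : Nat) (pat : List Char) (i j k : Nat) (plength : Int) : List Char :=
  match fuel with
  | 0 => pat
  | fuel + 1 =>
    if (pat.length : Int) < plength then
      let pat' := pat ++ pvNextPat i j k
      if i + 1 = 10 then
        if j + 1 = 26 then pvLoopA fuel pat' 0 0 (k + 1) plength
        else pvLoopA fuel pat' 0 (j + 1) k plength
      else pvLoopA fuel pat' (i + 1) j k plength
    else pat

def generate_pattern (plength : Int) : String :=
  if ((pvLoopA 6761 [] 0 0 0 plength).length : Int) > plength then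
    String.ofList (PySem.List.slice (pvLoopA 6761 [] 0 0 0 plength) none (some plength))
  else String.ofList (pvLoopA 6761 [] 0 0 0 plength)

-- ===== PORT B =====
-- element n: alphabet[n // 260].upper() + alphabet[n // 10 % 26] + str(n % 10)
def pvElemB (n : Int) : List Char :=
  (PySem.List.pyGetD pvAlphabet (PySem.Int.floordiv n 260) 'a').toUpper
    :: PySem.List.pyGetD pvAlphabet (PySem.Int.mod (PySem.Int.floordiv n 10) 26) 'a'
    :: PySem.Int.toChars (PySem.Int.mod n 10)

def generate_pattern_alt (plength : Int) : String :=
  String.ofList (PySem.List.slice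
    (((PySem.List.pyRange 0 (PySem.Int.floordiv (plength + 2) 3) 1).map pvElemB).flatten)
    none (some plength))

-- ===== PRECONDITION & SPEC =====
-- Pre_ excludes exactly plength > 20280, where A (alphabet[k] with k = 26) raises IndexError.
def Pre_generate_pattern (plength : Int) : Prop := plength ≤ 20280
instance (plength : Int) : Decidable (Pre_generate_pattern plength) := by
  unfold Pre_generate_pattern; infer_instance

def pvWitness_generate_pattern : Int := (12)

def Spec_generate_pattern (plength : Int) (out : String) : Prop := out = generate_pattern_alt plength
instance (plength : Int) (out : String) : Decidable (Spec_generate_pattern plength out) := by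
  unfold Spec_generate_pattern; infer_instance

-- ===== CLAIM (what is proved, stated in full; the proofs are below) =====
def Claim_equal_generate_pattern : Prop := ∀ (plength : Int), Dom_generate_pattern plength → Pre_generate_pattern plength → Spec_generate_pattern plength (generate_pattern plength)

-- ===== LEMMAS AND PROOFS =====

-- the element at index n, in A's counter form
def pvEN (n : Nat) : List Char := pvNextPat (n % 10) ((n / 10) % 26) (n / 260)

theorem pvToChars_len_digit (d : Nat) (hd : d < 10) : (PySem.Int.toChars (d : Int)).length = 1 := by
  interval_cases d <;> decide

theorem pvEN_length (n : Nat) (hn : n < 6760) : (pvEN n).length = 3 := by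
  have hk : n / 260 < 26 := by omega
  have hj : n / 10 % 26 < 26 := by omega
  unfold pvEN pvNextPat
  rw [List.getElem?_eq_getElem (by simpa [pvAlphabet] using hk),
      List.getElem?_eq_getElem (by simpa [pvAlphabet] using hj)]
  simp only [List.length_cons]
  rw [pvToChars_len_digit (n % 10) (by omega)]

theorem pvFlatten_len (g : Nat → List Char) (m : Nat) (h : ∀ l < m, (g l).length = 3) :
    (((List.range m).map g).flatten).length = 3 * m := by
  induction m with
  | zero => simp
  | succ m ih =>
    rw [List.range_succ]
    simp only [List.map_append, List.flatten_append, List.length_append]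
    rw [ih (fun l hl => h l (by omega))]
    simp [h m (by omega)]; omega

theorem pvLoopA_eq (P : Int) (c : Nat) (hc3 : P ≤ 3 * c) (hc : c ≤ 6760)
    (hcmin : ∀ m : Nat, P ≤ 3 * m → c ≤ m) :
    ∀ (d n : Nat) (pat : List Char), n ≤ 6760 → c ≤ n + d → pat.length = 3 * n →
    pvLoopA d pat (n % 10) ((n / 10) % 26) (n / 260) P =
      pat ++ ((List.range (c - n)).map (fun m => pvEN (n + m))).flatten := by
  intro d
  induction d with
  | zero =>
    intro n pat _ hnd hlen
    have : c - n = 0 := by omega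
    simp [pvLoopA, this]
  | succ d ih =>
    intro n pat hn hnd hlen
    unfold pvLoopA
    by_cases hcont : (pat.length : Int) < P
    · have hnc : n < c := by
        by_contra hge
        have : P ≤ 3 * n := by omega
        omega
      rw [if_pos hcont]
      have hlen' : (pat ++ pvNextPat (n % 10) (n / 10 % 26) (n / 260)).length = 3 * (n + 1) := by
        have : (pvNextPat (n % 10) (n / 10 % 26) (n / 260)).length = 3 :=
          pvEN_length n (by omega)
        simp [this, hlen]; omega
      have hrange : ((List.range (c - n)).map (fun m => pvEN (n + m))).flatten =
          pvEN n ++ ((List.range (c - (n + 1))).map (fun m => pvEN (n + 1 + m))).flatten := by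
        have hcn : c - n = (c - (n + 1)) + 1 := by omega
        rw [hcn, List.range_succ_eq_map]
        simp only [List.map_cons, List.flatten_cons, Nat.add_zero, List.map_map]
        congr 1
        congr 1
        apply List.map_congr_left
        intro a _
        simp only [Function.comp]
        congr 1
        omega
      have step : ∀ i' j' k', i' = (n+1) % 10 → j' = (n+1) / 10 % 26 → k' = (n+1) / 260 →
          pvLoopA d (pat ++ pvNextPat (n % 10) (n / 10 % 26) (n / 260)) i' j' k' P =
          pat ++ ((List.range (c - n)).map (fun m => pvEN (n + m))).flatten := by
        intro i' j' k' hi hj hk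
        subst hi; subst hj; subst hk
        rw [ih (n + 1) _ (by omega) (by omega) hlen', hrange]
        simp [pvEN, List.append_assoc]
      by_cases h9 : n % 10 + 1 = 10
      · rw [if_pos h9]
        by_cases h25 : n / 10 % 26 + 1 = 26
        · rw [if_pos h25]
          exact step _ _ _ (by omega) (by omega) (by omega)
        · rw [if_neg h25]
          exact step _ _ _ (by omega) (by omega) (by omega)
      · rw [if_neg h9]
        exact step _ _ _ (by omega) (by omega) (by omega)
    · rw [if_neg hcont]
      have : c ≤ n := hcmin n (by omega)
      have : c - n = 0 := by omega
      simp [this]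

theorem pvElemB_eq (n : Nat) (hn : n < 6760) : pvElemB (n : Int) = pvEN n := by
  have hk : n / 260 < 26 := by omega
  have hj : n / 10 % 26 < 26 := by omega
  unfold pvElemB pvEN pvNextPat
  have e1 : PySem.Int.floordiv (n : Int) 260 = ((n / 260 : Nat) : Int) := by
    rw [PySem.Int.floordiv_eq_ediv_of_pos (by norm_num)]; omega
  have e2 : PySem.Int.floordiv (n : Int) 10 = ((n / 10 : Nat) : Int) := by
    rw [PySem.Int.floordiv_eq_ediv_of_pos (by norm_num)]; omega
  have e3 : PySem.Int.mod ((n / 10 : Nat) : Int) 26 = ((n / 10 % 26 : Nat) : Int) := by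
    rw [PySem.Int.mod_eq_emod_of_pos (by norm_num)]; omega
  have e4 : PySem.Int.mod (n : Int) 10 = ((n % 10 : Nat) : Int) := by
    rw [PySem.Int.mod_eq_emod_of_pos (by norm_num)]; omega
  rw [e1, e2, e3, e4, PySem.List.pyGetD_natCast, PySem.List.pyGetD_natCast]
  rw [List.getElem?_eq_getElem (by simpa [pvAlphabet] using hk),
      List.getElem?_eq_getElem (by simpa [pvAlphabet] using hj)]
  simp [List.getD, (by simpa [pvAlphabet] using hk : n / 260 < pvAlphabet.length),
        (by simpa [pvAlphabet] using hj : n / 10 % 26 < pvAlphabet.length)]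

-- ===== VERDICT (by name: the statement is the Claim_ definition above) =====
theorem generate_pattern_spec : Claim_equal_generate_pattern := by
  intro P _ hpre
  unfold Spec_generate_pattern generate_pattern generate_pattern_alt
  have hpre' : P ≤ 20280 := hpre
  have hfd : PySem.Int.floordiv (P + 2) 3 = (P + 2) / 3 :=
    PySem.Int.floordiv_eq_ediv_of_pos (by norm_num)
  set cI : Int := (P + 2) / 3 with hcI
  have hckey : 3 * cI ≤ P + 2 ∧ P + 2 < 3 * cI + 3 := by constructor <;> omega
  set c : Nat := cI.toNat with hcN
  have hc3 : P ≤ 3 * (c : Int) := by omega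
  have hc6760 : c ≤ 6760 := by omega
  have hcmin : ∀ m : Nat, P ≤ 3 * m → c ≤ m := by intro m hm; omega
  have hloop := pvLoopA_eq P c (by exact_mod_cast hc3) hc6760
      (fun m hm => hcmin m (by exact_mod_cast hm)) 6761 0 [] (by omega) (by omega) (by simp)
  simp only [Nat.zero_mod, Nat.zero_div, Nat.sub_zero, Nat.zero_add, List.nil_append] at hloop
  have hB : ((PySem.List.pyRange 0 (PySem.Int.floordiv (P + 2) 3) 1).map pvElemB) =
      (List.range c).map (fun m => pvEN (0 + m)) := by
    rw [hfd, PySem.List.pyRange_one]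
    have hsub : (cI - 0).toNat = c := by omega
    rw [hsub, List.map_map]
    apply List.map_congr_left
    intro a ha
    have hac : a < c := List.mem_range.mp ha
    simp only [Function.comp, zero_add]
    exact pvElemB_eq a (by omega)
  have hEN0 : (List.range c).map (fun m => pvEN (0 + m)) = (List.range c).map pvEN := by
    simp
  rw [hloop, hB, hEN0]
  set pat := ((List.range c).map pvEN).flatten with hpat
  have hpatlen : pat.length = 3 * c := by
    rw [hpat]
    exact pvFlatten_len pvEN c (fun l hl => pvEN_length l (by omega))
  by_cases hgt : (pat.length : Int) > P
  · rw [if_pos hgt]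
  · rw [if_neg hgt]
    have h0P : 0 ≤ P := by omega
    rw [PySem.List.slice_to (b := P) pat h0P]
    congr 1
    have hPn : P.toNat = pat.length := by omega
    rw [hPn, List.take_length]
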